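-- pv_equiv track=rewrite | github.com/redfox193/Data-Structures-and-Algorithms | algorithms/ncrmodprime.py | divmod
-- ===== SOURCE A (Python) =====
-- def divmod(a, b, p):
--     a %= p
--     b %= p
--     res = 1
--     k = p - 2
--
--     while(k != 0):
--         if(k % 2 == 0):
--             k >>= 1
--             b = (b * b) % p
--         else:
--             k -= 1
--             res = (res * b) % p
--
--     return (a * res) % p
-- ===== SOURCE B (Python) =====
-- def divmod(a, b, p):
--     a %= p
--     b %= p
--
--     def powmod(base, exp):
--         if exp == 0:
--             return 1
--         half = powmod((base * base) % p, exp // 2)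
--         return (half * base) % p if exp % 2 else half
--
--     return (a * powmod(b, p - 2)) % p
-- ===== Notes on version B (the rewrite author's own statement) =====
-- stated objective: alternative
-- what changed: Replaces A's iterative bit-decrement/halving while-loop over k=p-2 (mutating b and res) with a recursive divide-and-conquer modular exponentiation powmod(base, exp) that squares the base and recurses on exp//2.
import Mathlib
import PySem

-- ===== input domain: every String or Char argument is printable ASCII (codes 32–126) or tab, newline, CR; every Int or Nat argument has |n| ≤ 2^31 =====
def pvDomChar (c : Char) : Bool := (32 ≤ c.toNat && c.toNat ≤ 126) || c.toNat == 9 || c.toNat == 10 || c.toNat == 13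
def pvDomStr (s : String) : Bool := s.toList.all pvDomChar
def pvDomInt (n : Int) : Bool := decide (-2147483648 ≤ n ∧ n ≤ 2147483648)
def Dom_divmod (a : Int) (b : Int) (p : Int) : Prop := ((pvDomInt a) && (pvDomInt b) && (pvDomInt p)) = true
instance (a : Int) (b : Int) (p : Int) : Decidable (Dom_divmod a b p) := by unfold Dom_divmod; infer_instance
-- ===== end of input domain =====

-- B replaces A's iterative halve/decrement loop on k = p-2 by a recursive square-and-multiply
-- modular exponentiation; same O(log p) cost, different decomposition (objective: alternative).

-- ===== PORT A =====
-- the while(k != 0) loop of A, state (b, res, k); for k < 0 the Python loops forever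
-- (that happens only for p < 2, excluded by Pre_divmod), so the port exits there as a totality guard
def divmodLoopA (p b res k : Int) : Int :=
  if _h0 : k = 0 then res
  else if _hneg : k < 0 then res   -- unreachable under Pre_divmod (Python diverges here)
  else if _he : PySem.Int.mod k 2 = 0 then
    divmodLoopA p (PySem.Int.mod (b * b) p) res (PySem.Int.floordiv k 2)   -- k >>= 1; b = (b*b) % p
  else
    divmodLoopA p b (PySem.Int.mod (res * b) p) (k - 1)                    -- k -= 1; res = (res*b) % p
termination_by k.toNat
decreasing_by
  · rw [PySem.Int.floordiv_eq_ediv_of_pos (by omega)]; omega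
  · omega

def divmod (a : Int) (b : Int) (p : Int) : Int :=
  let a' := PySem.Int.mod a p
  let b' := PySem.Int.mod b p
  PySem.Int.mod (a' * divmodLoopA p b' 1 (p - 2)) p

-- ===== PORT B =====
-- recursive helper powmod of Source B (p is the captured closure variable); Python's base case is
-- exp == 0 and it recurses forever for exp < 0 (only reachable for p < 2, outside Pre_divmod),
-- so the port returns 1 for exp ≤ 0 as a totality guard
def powmodB (base exp p : Int) : Int :=
  if _h0 : exp ≤ 0 then 1
  else if PySem.Int.mod exp 2 ≠ 0 then
    -- half = powmod((base*base) % p, exp // 2); return (half * base) % p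
    PySem.Int.mod (powmodB (PySem.Int.mod (base * base) p) (PySem.Int.floordiv exp 2) p * base) p
  else
    powmodB (PySem.Int.mod (base * base) p) (PySem.Int.floordiv exp 2) p
termination_by exp.toNat
decreasing_by
  all_goals rw [PySem.Int.floordiv_eq_ediv_of_pos (by omega)]; omega

def divmod_alt (a : Int) (b : Int) (p : Int) : Int :=
  let a' := PySem.Int.mod a p
  let b' := PySem.Int.mod b p
  PySem.Int.mod (a' * powmodB b' (p - 2) p) p

-- ===== PRECONDITION & SPEC =====
-- Pre_ excludes exactly the inputs where A returns no value: p = 0 raises ZeroDivisionError,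
-- and for any other p < 2 the loop runs forever (k = p - 2 < 0 stays negative).
def Pre_divmod (a : Int) (b : Int) (p : Int) : Prop := 2 ≤ p
instance (a : Int) (b : Int) (p : Int) : Decidable (Pre_divmod a b p) := by unfold Pre_divmod; infer_instance
def pvWitness_divmod : Int × Int × Int := (3, 4, 7)

def Spec_divmod (a : Int) (b : Int) (p : Int) (out : Int) : Prop := out = divmod_alt a b p
instance (a : Int) (b : Int) (p : Int) (out : Int) : Decidable (Spec_divmod a b p out) := by unfold Spec_divmod; infer_instance

-- ===== CLAIM (what is proved, stated in full; the proofs are below) =====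
def Claim_equal_divmod : Prop := ∀ (a : Int) (b : Int) (p : Int), Dom_divmod a b p → Pre_divmod a b p → Spec_divmod a b p (divmod a b p)

-- ===== LEMMAS AND PROOFS =====

-- reducing the base modulo p does not change a power modulo p
theorem emod_pow_emod (a p : Int) (k : Nat) : (a % p) ^ k % p = a ^ k % p :=
  Int.ModEq.pow k (Int.emod_emod_of_dvd a dvd_rfl)

-- B's recursion computes base ^ exp modulo p
theorem powmodB_emod (p : Int) (hp : 0 < p) :
    ∀ n (base exp : Int), exp.toNat = n → 0 ≤ exp →
      powmodB base exp p % p = base ^ exp.toNat % p := by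
  intro n
  induction n using Nat.strong_induction_on with
  | _ n ih =>
    intro base exp hn hexp
    rw [powmodB]
    by_cases h0 : exp ≤ 0
    · have : exp = 0 := le_antisymm h0 hexp
      subst this; simp
    · rw [dif_neg h0]
      have h2 : PySem.Int.mod exp 2 = exp % 2 :=
        PySem.Int.mod_eq_emod_of_pos (by norm_num)
      have hdiv : PySem.Int.floordiv exp 2 = exp / 2 :=
        PySem.Int.floordiv_eq_ediv_of_pos (by norm_num)
      have hlt : (exp / 2).toNat < n := by omega
      have key : powmodB (PySem.Int.mod (base * base) p) (PySem.Int.floordiv exp 2) p % p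
          = base ^ (2 * (exp / 2).toNat) % p := by
        rw [hdiv, ih _ hlt _ _ rfl (by omega),
            PySem.Int.mod_eq_emod_of_pos hp, emod_pow_emod,
            show base * base = base ^ 2 by ring, ← pow_mul]
      rw [h2]
      by_cases he : exp % 2 = 0
      · rw [if_neg (by simp [he]), key]
        congr 2
        omega
      · rw [if_pos he, PySem.Int.mod_eq_emod_of_pos hp,
            Int.emod_emod_of_dvd _ dvd_rfl, Int.mul_emod, key, ← Int.mul_emod,
            ← pow_succ]
        congr 2
        omega

-- A's loop computes res * b ^ k modulo p
theorem divmodLoopA_emod (p : Int) (hp : 0 < p) :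
    ∀ n (b res k : Int), k.toNat = n → 0 ≤ k →
      divmodLoopA p b res k % p = res * b ^ k.toNat % p := by
  intro n
  induction n using Nat.strong_induction_on with
  | _ n ih =>
    intro b res k hn hk
    rw [divmodLoopA]
    by_cases h0 : k = 0
    · subst h0; simp
    · rw [dif_neg h0, dif_neg (by omega : ¬ k < 0)]
      have h2 : PySem.Int.mod k 2 = k % 2 :=
        PySem.Int.mod_eq_emod_of_pos (by norm_num)
      have hdiv : PySem.Int.floordiv k 2 = k / 2 :=
        PySem.Int.floordiv_eq_ediv_of_pos (by norm_num)
      rw [h2]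
      by_cases he : k % 2 = 0
      · have hlt : (k / 2).toNat < n := by omega
        rw [dif_pos he, hdiv, ih _ hlt _ _ _ rfl (by omega),
            PySem.Int.mod_eq_emod_of_pos hp,
            Int.mul_emod, emod_pow_emod, ← Int.mul_emod,
            show b * b = b ^ 2 by ring, ← pow_mul]
        congr 3
        omega
      · have hlt : (k - 1).toNat < n := by omega
        rw [dif_neg he, ih _ hlt _ _ _ rfl (by omega),
            PySem.Int.mod_eq_emod_of_pos hp,
            Int.mul_emod, Int.emod_emod_of_dvd _ dvd_rfl, ← Int.mul_emod,
            mul_assoc, ← pow_succ']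
        congr 3
        omega

-- ===== VERDICT (by name: the statement is the Claim_ definition above) =====
theorem divmod_spec : Claim_equal_divmod := by
  intro a b p _ hpre
  unfold Pre_divmod at hpre
  unfold Spec_divmod divmod divmod_alt
  have hp : (0:Int) < p := by omega
  simp only [PySem.Int.mod_eq_emod_of_pos hp]
  rw [Int.mul_emod, Int.mul_emod (a % p) (powmodB (b % p) (p - 2) p),
      divmodLoopA_emod p hp _ _ _ _ rfl (by omega),
      powmodB_emod p hp _ _ _ rfl (by omega), one_mul]
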